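-- pv_equiv track=rewrite | github.com/suhasgumma/Problem-Solving | codeForces/Ladder 1200 to 1300/BFoxDividingCheeseScore4.py | solve
-- ===== SOURCE A (Python) =====
-- def solve(n, m):
--     if n == m: return 0
--
--     a2, b2, a3, b3, a5, b5 = 0, 0, 0, 0,0, 0
--
--     while n%2 == 0:
--         n = n//2
--         a2+=1
--     while m%2 == 0:
--         m = m//2
--         b2+=1
--
--     while n%5 == 0:
--         n = n//5
--         a5+=1
--     while m%5 == 0:
--         m = m//5
--         b5+=1
--
--
--     while n%3 == 0:
--         n = n//3
--         a3+=1
--     while m%3 == 0: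
--         m = m//3
--         b3+=1
--
--
--     if n!= m: return -1
--
--     res = abs(a2-b2)+ abs(a3-b3)+ abs(a5-b5)
--
--     return res
-- ===== SOURCE B (Python) =====
-- def _gcd(a, b):
--     a, b = abs(a), abs(b)
--     while b:
--         a, b = b, a % b
--     return a
--
-- def solve(n, m):
--     if n == m:
--         return 0
--     g = _gcd(n, m)
--     a, b, total = n // g, m // g, 0
--     for p in (2, 3, 5):
--         while a % p == 0:
--             a //= p
--             total += 1
--         while b % p == 0:
--             b //= p
--             total += 1
--     return total if a == b else -1
-- ===== Notes on version B (the rewrite author's own statement) =====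
-- stated objective: alternative
-- what changed: Instead of stripping 2/3/5 from n and m separately and summing |exponent differences|, B first cancels the common part with Euclid's gcd and then simply counts the 2/3/5 factors of the two quotients n//g and m//g (their exponents are automatically the absolute differences), returning -1 if the quotients do not reduce to the same value.
import Mathlib
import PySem

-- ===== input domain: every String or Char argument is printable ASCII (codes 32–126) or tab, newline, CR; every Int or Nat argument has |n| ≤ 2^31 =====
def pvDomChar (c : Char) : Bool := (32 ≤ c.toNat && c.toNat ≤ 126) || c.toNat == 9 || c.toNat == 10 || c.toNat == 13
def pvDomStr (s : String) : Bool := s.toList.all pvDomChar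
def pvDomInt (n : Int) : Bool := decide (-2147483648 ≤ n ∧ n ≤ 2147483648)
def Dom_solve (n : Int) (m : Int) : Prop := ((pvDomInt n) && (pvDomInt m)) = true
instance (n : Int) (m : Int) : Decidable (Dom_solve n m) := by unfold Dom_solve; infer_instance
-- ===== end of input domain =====

-- B cancels the common part of n and m with Euclid's gcd first and then counts the 2/3/5 factors of the two
-- quotients (an alternative algorithm, same cost). Pre_ excludes only the inputs on which A never returns.


-- ===== PORT A =====
-- 'while x % p == 0: x //= p; c += 1', totalised with fuel x.natAbs (enough whenever x ≠ 0: each division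
-- shrinks |x|; the fuel never changes the value where the Python loop terminates).
def stripGo (p : Int) : Nat → Int → Int → Int × Int
  | 0, x, c => (x, c)
  | f + 1, x, c =>
    if PySem.Int.mod x p = 0 then stripGo p f (PySem.Int.floordiv x p) (c + 1) else (x, c)

def pyStrip (p : Int) (x : Int) : Int × Int := stripGo p x.natAbs x 0

def solve (n : Int) (m : Int) : Int :=
  if n = m then 0
  else
    let r2 := pyStrip 2 n
    let s2 := pyStrip 2 m
    let r5 := pyStrip 5 r2.1
    let s5 := pyStrip 5 s2.1
    let r3 := pyStrip 3 r5.1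
    let s3 := pyStrip 3 s5.1
    if r3.1 ≠ s3.1 then -1
    else |r2.2 - s2.2| + |r3.2 - s3.2| + |r5.2 - s5.2|

-- ===== PORT B =====
-- 'while b: a, b = b, a % b' on the absolute values (Euclid's algorithm from Source B)
def euclidNat (a b : Nat) : Nat :=
  if h : b = 0 then a else euclidNat b (a % b)
termination_by b
decreasing_by exact Nat.mod_lt _ (Nat.pos_of_ne_zero h)

def pygcd (n m : Int) : Int := ((euclidNat n.natAbs m.natAbs : Nat) : Int)

-- B's inner 'while x % p == 0: x //= p; total += 1' with the running total threaded through (fuel as in port A)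
def stripB (p : Int) : Nat → Int → Int → Int × Int
  | 0, x, t => (x, t)
  | f + 1, x, t =>
    if PySem.Int.mod x p = 0 then stripB p f (PySem.Int.floordiv x p) (t + 1) else (x, t)

def solve_alt (n : Int) (m : Int) : Int :=
  if n = m then 0
  else
    let g := pygcd n m
    let st := [(2 : Int), 3, 5].foldl
      (fun (st : Int × Int × Int) p =>
        let r := stripB p st.1.natAbs st.1 st.2.2
        let s := stripB p st.2.1.natAbs st.2.1 r.2
        (r.1, s.1, s.2))
      (PySem.Int.floordiv n g, PySem.Int.floordiv m g, 0)
    if st.1 = st.2.1 then st.2.2 else -1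

-- ===== PRECONDITION & SPEC =====
-- Pre_ excludes exactly the inputs (n = 0 or m = 0 with n ≠ m) on which A's while-loops never terminate
-- (0 % p == 0 forever); A returns on every input satisfying Pre_.
def Pre_solve (n : Int) (m : Int) : Prop := (n ≠ 0 ∧ m ≠ 0) ∨ n = m
instance (n : Int) (m : Int) : Decidable (Pre_solve n m) := by unfold Pre_solve; infer_instance
def pvWitness_solve : Int × Int := (12, 18)

def Spec_solve (n : Int) (m : Int) (out : Int) : Prop := out = solve_alt n m
instance (n : Int) (m : Int) (out : Int) : Decidable (Spec_solve n m out) := by unfold Spec_solve; infer_instance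

-- ===== CLAIM (what is proved, stated in full; the proofs are below) =====
def Claim_equal_solve : Prop := ∀ (n : Int) (m : Int), Dom_solve n m → Pre_solve n m → Spec_solve n m (solve n m)

-- ===== LEMMAS AND PROOFS =====

-- p-adic valuation and its cofactor, on the Int carrying the sign
def vE (p : Nat) (x : Int) : Nat := x.natAbs.factorization p
def ocE (p : Nat) (x : Int) : Int := x / (p : Int) ^ vE p x

theorem stripB_eq_stripGo (p : Int) : ∀ (f : Nat) (x t : Int), stripB p f x t = stripGo p f x t := by
  intro f
  induction f with
  | zero => intro x t; rfl
  | succ f ih =>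
    intro x t
    simp only [stripB, stripGo]
    split <;> simp [ih]

theorem stripGo_exact (p : Int) (hp : 2 ≤ p) :
    ∀ (v f : Nat), v ≤ f → ∀ (k c : Int), ¬ p ∣ k →
      stripGo p f (p ^ v * k) c = (k, c + v) := by
  intro v
  induction v with
  | zero =>
    intro f _ k c hk
    cases f with
    | zero => simp [stripGo]
    | succ f =>
      simp only [stripGo, pow_zero, one_mul]
      rw [if_neg (by rw [PySem.Int.mod_eq_zero_iff_dvd]; exact hk)]
      simp
  | succ v ih =>
    intro f hf k c hk
    obtain ⟨f, rfl⟩ : ∃ f', f = f' + 1 := ⟨f - 1, by omega⟩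
    have hp0 : p ≠ 0 := by omega
    simp only [stripGo]
    rw [if_pos (by rw [PySem.Int.mod_eq_zero_iff_dvd]; exact ⟨p ^ v * k, by ring⟩)]
    have hfd : PySem.Int.floordiv (p ^ (v + 1) * k) p = p ^ v * k := by
      rw [PySem.Int.floordiv_eq_ediv_of_pos (by omega),
        show p ^ (v + 1) * k = p * (p ^ v * k) by ring, Int.mul_ediv_cancel_left _ hp0]
    rw [hfd, ih f (by omega) k (c + 1) hk]
    refine Prod.ext rfl ?_
    push_cast
    ring

theorem oc_spec (p : Nat) (hp : p.Prime) (x : Int) (hx : x ≠ 0) :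
    x = (p : Int) ^ vE p x * ocE p x ∧ ¬ (p : Int) ∣ ocE p x ∧
      (ocE p x).natAbs = x.natAbs / p ^ vE p x := by
  have hpow0 : ((p : Int)) ^ vE p x ≠ 0 := pow_ne_zero _ (by exact_mod_cast hp.pos.ne')
  have hd : ((p : Int)) ^ vE p x ∣ x := by
    rw [show ((p : Int)) ^ vE p x = ((p ^ vE p x : Nat) : Int) by push_cast; ring, Int.natCast_dvd]
    exact Nat.ordProj_dvd _ _
  obtain ⟨k, hk⟩ := hd
  have hoc : ocE p x = k := by
    rw [ocE]
    nth_rewrite 1 [hk]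
    exact Int.mul_ediv_cancel_left _ hpow0
  have hna : x.natAbs = p ^ vE p x * k.natAbs := by
    conv_lhs => rw [hk]
    simp [Int.natAbs_mul, Int.natAbs_pow]
  refine ⟨by rw [hoc, ← hk], ?_, ?_⟩
  · intro hdk
    rw [hoc] at hdk
    have hpk : p ∣ k.natAbs := by rwa [Int.natCast_dvd] at hdk
    have : p ^ (vE p x + 1) ∣ x.natAbs := by
      rw [hna, pow_succ]
      exact mul_dvd_mul dvd_rfl hpk
    exact Nat.pow_succ_factorization_not_dvd (by simpa using hx) hp this
  · rw [hoc, hna, Nat.mul_div_cancel_left _ (pow_pos hp.pos _)]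

theorem oc_ne (p : Nat) (hp : p.Prime) (x : Int) (hx : x ≠ 0) : ocE p x ≠ 0 := by
  intro h0
  have := (oc_spec p hp x hx).1
  rw [h0, mul_zero] at this
  exact hx this

theorem sign_oc (p : Nat) (hp : p.Prime) (x : Int) (hx : x ≠ 0) : (ocE p x).sign = x.sign := by
  have h := (oc_spec p hp x hx).1
  have hpos : (0 : Int) < (p : Int) ^ vE p x := pow_pos (by exact_mod_cast hp.pos) _
  calc (ocE p x).sign = ((p : Int) ^ vE p x).sign * (ocE p x).sign := by
        rw [Int.sign_eq_one_of_pos hpos, one_mul]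
    _ = x.sign := by rw [← Int.sign_mul, ← h]

theorem vE_oc (p : Nat) (hp : p.Prime) (x : Int) (hx : x ≠ 0) (q : Nat) :
    vE q (ocE p x) = if q = p then 0 else vE q x := by
  have hna := (oc_spec p hp x hx).2.2
  simp only [vE] at hna ⊢
  rw [hna, Nat.factorization_ordCompl]
  by_cases h : q = p
  · simp [h]
  · simp [Finsupp.erase_ne h, h]

theorem strip_eval (p : Nat) (hp : p.Prime) (x c : Int) (hx : x ≠ 0) :
    stripGo (p : Int) x.natAbs x c = (ocE p x, c + (vE p x : Int)) := by
  obtain ⟨hmul, hnd, _⟩ := oc_spec p hp x hx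
  have hfuel : vE p x ≤ x.natAbs := by
    have hd : p ^ vE p x ∣ x.natAbs := Nat.ordProj_dvd _ _
    have h1 : p ^ vE p x ≤ x.natAbs := Nat.le_of_dvd (by simpa using hx) hd
    have h2 : vE p x < 2 ^ vE p x := Nat.lt_two_pow_self
    have h3 : 2 ^ vE p x ≤ p ^ vE p x := Nat.pow_le_pow_left hp.two_le _
    omega
  calc stripGo (p : Int) x.natAbs x c
      = stripGo (p : Int) x.natAbs ((p : Int) ^ vE p x * ocE p x) c := by rw [← hmul]
    _ = (ocE p x, c + (vE p x : Int)) :=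
        stripGo_exact _ (by exact_mod_cast hp.two_le) _ _ hfuel _ _ hnd

theorem strip2 (x c : Int) (hx : x ≠ 0) :
    stripGo 2 x.natAbs x c = (ocE 2 x, c + (vE 2 x : Int)) := by
  have h := strip_eval 2 Nat.prime_two x c hx
  simpa using h

theorem strip3 (x c : Int) (hx : x ≠ 0) :
    stripGo 3 x.natAbs x c = (ocE 3 x, c + (vE 3 x : Int)) := by
  have h := strip_eval 3 Nat.prime_three x c hx
  simpa using h

theorem strip5 (x c : Int) (hx : x ≠ 0) :
    stripGo 5 x.natAbs x c = (ocE 5 x, c + (vE 5 x : Int)) := by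
  have h := strip_eval 5 Nat.prime_five x c hx
  simpa using h

theorem euclidNat_eq_gcd (b : Nat) : ∀ a : Nat, euclidNat a b = Nat.gcd a b := by
  induction b using Nat.strong_induction_on with
  | _ b ih =>
    intro a
    rw [euclidNat]
    by_cases hb : b = 0
    · simp [hb]
    · rw [dif_neg hb, ih (a % b) (Nat.mod_lt _ (Nat.pos_of_ne_zero hb)) b,
        Nat.gcd_comm b (a % b), ← Nat.gcd_rec]
      exact Nat.gcd_comm b a

theorem int_eq_iff (y z : Int) (hy : y ≠ 0) (hz : z ≠ 0) :
    y = z ↔ (y.sign = z.sign ∧ ∀ q, vE q y = vE q z) := by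
  constructor
  · rintro rfl; exact ⟨rfl, fun _ => rfl⟩
  · rintro ⟨hs, hv⟩
    have hna : y.natAbs = z.natAbs :=
      Nat.eq_of_factorization_eq (by simpa using hy) (by simpa using hz) hv
    rw [← Int.sign_mul_natAbs y, ← Int.sign_mul_natAbs z, hs, hna]

theorem abs_sub_cast (u v : Nat) :
    |(u : Int) - v| = ((u - min u v : Nat) : Int) + ((v - min u v : Nat) : Int) := by
  rcases le_total u v with h | h
  · rw [min_eq_left h, abs_of_nonpos (by omega)]; omega
  · rw [min_eq_right h, abs_of_nonneg (by omega)]; omega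

theorem solve_eq_closed (n m : Int) (hn : n ≠ 0) (hm : m ≠ 0) (hnm : n ≠ m) :
    solve n m =
      if ocE 3 (ocE 5 (ocE 2 n)) ≠ ocE 3 (ocE 5 (ocE 2 m)) then -1
      else |(vE 2 n : Int) - (vE 2 m : Int)| + |(vE 3 n : Int) - (vE 3 m : Int)|
            + |(vE 5 n : Int) - (vE 5 m : Int)| := by
  have h2n := oc_ne 2 Nat.prime_two n hn
  have h2m := oc_ne 2 Nat.prime_two m hm
  have h5n := oc_ne 5 Nat.prime_five _ h2n
  have h5m := oc_ne 5 Nat.prime_five _ h2m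
  simp only [solve, if_neg hnm, pyStrip]
  rw [strip2 n 0 hn, strip2 m 0 hm]
  simp only
  rw [strip5 _ 0 h2n, strip5 _ 0 h2m]
  simp only
  rw [strip3 _ 0 h5n, strip3 _ 0 h5m]
  simp only [zero_add]
  rw [vE_oc 2 Nat.prime_two n hn 5, vE_oc 2 Nat.prime_two m hm 5,
    vE_oc 5 Nat.prime_five _ h2n 3, vE_oc 5 Nat.prime_five _ h2m 3,
    vE_oc 2 Nat.prime_two n hn 3, vE_oc 2 Nat.prime_two m hm 3]
  norm_num

theorem solve_alt_eq_closed (n m : Int) (a b : Int) (ha : a ≠ 0) (hb : b ≠ 0)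
    (hfa : PySem.Int.floordiv n (pygcd n m) = a) (hfb : PySem.Int.floordiv m (pygcd n m) = b)
    (hnm : n ≠ m) :
    solve_alt n m =
      if ocE 5 (ocE 3 (ocE 2 a)) = ocE 5 (ocE 3 (ocE 2 b)) then
        (vE 2 a : Int) + (vE 2 b : Int) + (vE 3 a : Int) + (vE 3 b : Int)
          + (vE 5 a : Int) + (vE 5 b : Int)
      else -1 := by
  have h2a := oc_ne 2 Nat.prime_two a ha
  have h2b := oc_ne 2 Nat.prime_two b hb
  have h3a := oc_ne 3 Nat.prime_three _ h2a
  have h3b := oc_ne 3 Nat.prime_three _ h2b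
  simp only [solve_alt, if_neg hnm, List.foldl, stripB_eq_stripGo, hfa, hfb]
  rw [strip2 a _ ha, strip2 b _ hb]
  simp only
  rw [strip3 _ _ h2a, strip3 _ _ h2b]
  simp only
  rw [strip5 _ _ h3a, strip5 _ _ h3b]
  simp only
  rw [vE_oc 2 Nat.prime_two a ha 3, vE_oc 2 Nat.prime_two b hb 3,
    vE_oc 3 Nat.prime_three _ h2a 5, vE_oc 3 Nat.prime_three _ h2b 5,
    vE_oc 2 Nat.prime_two a ha 5, vE_oc 2 Nat.prime_two b hb 5]
  norm_num

theorem tripleA (x : Int) (hx : x ≠ 0) :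
    ocE 3 (ocE 5 (ocE 2 x)) ≠ 0 ∧ (ocE 3 (ocE 5 (ocE 2 x))).sign = x.sign ∧
      ∀ q, vE q (ocE 3 (ocE 5 (ocE 2 x))) = if q = 2 ∨ q = 3 ∨ q = 5 then 0 else vE q x := by
  have h2 := oc_ne 2 Nat.prime_two x hx
  have h5 := oc_ne 5 Nat.prime_five _ h2
  have h3 := oc_ne 3 Nat.prime_three _ h5
  refine ⟨h3, ?_, ?_⟩
  · rw [sign_oc 3 Nat.prime_three _ h5, sign_oc 5 Nat.prime_five _ h2,
      sign_oc 2 Nat.prime_two _ hx]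
  · intro q
    rw [vE_oc 3 Nat.prime_three _ h5 q]
    by_cases hq3 : q = 3
    · simp [hq3]
    · rw [if_neg hq3, vE_oc 5 Nat.prime_five _ h2 q]
      by_cases hq5 : q = 5
      · simp [hq5]
      · rw [if_neg hq5, vE_oc 2 Nat.prime_two _ hx q]
        by_cases hq2 : q = 2 <;> simp [hq2, hq3, hq5]

theorem tripleB (x : Int) (hx : x ≠ 0) :
    ocE 5 (ocE 3 (ocE 2 x)) ≠ 0 ∧ (ocE 5 (ocE 3 (ocE 2 x))).sign = x.sign ∧
      ∀ q, vE q (ocE 5 (ocE 3 (ocE 2 x))) = if q = 2 ∨ q = 3 ∨ q = 5 then 0 else vE q x := by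
  have h2 := oc_ne 2 Nat.prime_two x hx
  have h3 := oc_ne 3 Nat.prime_three _ h2
  have h5 := oc_ne 5 Nat.prime_five _ h3
  refine ⟨h5, ?_, ?_⟩
  · rw [sign_oc 5 Nat.prime_five _ h3, sign_oc 3 Nat.prime_three _ h2,
      sign_oc 2 Nat.prime_two _ hx]
  · intro q
    rw [vE_oc 5 Nat.prime_five _ h3 q]
    by_cases hq5 : q = 5
    · simp [hq5]
    · rw [if_neg hq5, vE_oc 3 Nat.prime_three _ h2 q]
      by_cases hq3 : q = 3
      · simp [hq3]
      · rw [if_neg hq3, vE_oc 2 Nat.prime_two _ hx q]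
        by_cases hq2 : q = 2 <;> simp [hq2, hq3, hq5]

theorem main_case (n m : Int) (hn : n ≠ 0) (hm : m ≠ 0) (hnm : n ≠ m) :
    solve n m = solve_alt n m := by
  have hn' : n.natAbs ≠ 0 := by simpa using hn
  have hm' : m.natAbs ≠ 0 := by simpa using hm
  obtain ⟨g, hgdef⟩ : ∃ g, g = Nat.gcd n.natAbs m.natAbs := ⟨_, rfl⟩
  have hg0 : g ≠ 0 := fun h => hn' (Nat.gcd_eq_zero_iff.1 (hgdef ▸ h)).1
  have hgZ : pygcd n m = ((g : Nat) : Int) := by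
    simp [pygcd, euclidNat_eq_gcd, hgdef]
  have hgpos : (0 : Int) < ((g : Nat) : Int) := by
    exact_mod_cast Nat.pos_of_ne_zero hg0
  obtain ⟨a, hadef⟩ : ((g : Nat) : Int) ∣ n := by
    rw [Int.natCast_dvd, hgdef]; exact Nat.gcd_dvd_left _ _
  obtain ⟨b, hbdef⟩ : ((g : Nat) : Int) ∣ m := by
    rw [Int.natCast_dvd, hgdef]; exact Nat.gcd_dvd_right _ _
  have hfa : PySem.Int.floordiv n (pygcd n m) = a := by
    rw [hgZ, PySem.Int.floordiv_eq_ediv_of_pos hgpos, hadef,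
      Int.mul_ediv_cancel_left _ hgpos.ne']
  have hfb : PySem.Int.floordiv m (pygcd n m) = b := by
    rw [hgZ, PySem.Int.floordiv_eq_ediv_of_pos hgpos, hbdef,
      Int.mul_ediv_cancel_left _ hgpos.ne']
  have ha0 : a ≠ 0 := by intro h; rw [h, mul_zero] at hadef; exact hn hadef
  have hb0 : b ≠ 0 := by intro h; rw [h, mul_zero] at hbdef; exact hm hbdef
  have hnaa : a.natAbs = n.natAbs / g := by
    have h : n.natAbs = g * a.natAbs := by
      rw [hadef, Int.natAbs_mul]; simp
    rw [h, Nat.mul_div_cancel_left _ (Nat.pos_of_ne_zero hg0)]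
  have hnab : b.natAbs = m.natAbs / g := by
    have h : m.natAbs = g * b.natAbs := by
      rw [hbdef, Int.natAbs_mul]; simp
    rw [h, Nat.mul_div_cancel_left _ (Nat.pos_of_ne_zero hg0)]
  have hva : ∀ q, vE q a = vE q n - min (vE q n) (vE q m) := by
    intro q
    simp only [vE]
    rw [hnaa, hgdef, Nat.factorization_div (Nat.gcd_dvd_left _ _), Finsupp.tsub_apply,
      Nat.factorization_gcd hn' hm', Finsupp.inf_apply]
  have hvb : ∀ q, vE q b = vE q m - min (vE q n) (vE q m) := by
    intro q
    simp only [vE]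
    rw [hnab, hgdef, Nat.factorization_div (Nat.gcd_dvd_right _ _), Finsupp.tsub_apply,
      Nat.factorization_gcd hn' hm', Finsupp.inf_apply]
  have hsa : a.sign = n.sign := by
    calc a.sign = ((g : Nat) : Int).sign * a.sign := by
          rw [Int.sign_eq_one_of_pos hgpos, one_mul]
      _ = n.sign := by rw [← Int.sign_mul, ← hadef]
  have hsb : b.sign = m.sign := by
    calc b.sign = ((g : Nat) : Int).sign * b.sign := by
          rw [Int.sign_eq_one_of_pos hgpos, one_mul]
      _ = m.sign := by rw [← Int.sign_mul, ← hbdef]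
  obtain ⟨hA0n, hAsn, hAvn⟩ := tripleA n hn
  obtain ⟨hA0m, hAsm, hAvm⟩ := tripleA m hm
  obtain ⟨hB0a, hBsa, hBva⟩ := tripleB a ha0
  obtain ⟨hB0b, hBsb, hBvb⟩ := tripleB b hb0
  have hiff : (ocE 5 (ocE 3 (ocE 2 a)) = ocE 5 (ocE 3 (ocE 2 b))) ↔
      (ocE 3 (ocE 5 (ocE 2 n)) = ocE 3 (ocE 5 (ocE 2 m))) := by
    rw [int_eq_iff _ _ hB0a hB0b, int_eq_iff _ _ hA0n hA0m]
    constructor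
    · rintro ⟨hs, hv⟩
      refine ⟨by rw [hAsn, hAsm, ← hsa, ← hsb, ← hBsa, ← hBsb, hs], ?_⟩
      intro q
      have hq := hv q
      rw [hBva q, hBvb q] at hq
      rw [hAvn q, hAvm q]
      by_cases h : q = 2 ∨ q = 3 ∨ q = 5
      · simp [h]
      · simp only [if_neg h] at hq ⊢
        have h1 := hva q
        have h2 := hvb q
        omega
    · rintro ⟨hs, hv⟩
      refine ⟨by rw [hBsa, hBsb, hsa, hsb, ← hAsn, ← hAsm, hs], ?_⟩
      intro q
      have hq := hv q
      rw [hAvn q, hAvm q] at hq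
      rw [hBva q, hBvb q]
      by_cases h : q = 2 ∨ q = 3 ∨ q = 5
      · simp [h]
      · simp only [if_neg h] at hq ⊢
        have h1 := hva q
        have h2 := hvb q
        omega
  rw [solve_eq_closed n m hn hm hnm, solve_alt_eq_closed n m a b ha0 hb0 hfa hfb hnm]
  by_cases hres : ocE 5 (ocE 3 (ocE 2 a)) = ocE 5 (ocE 3 (ocE 2 b))
  · rw [if_pos hres, if_neg (not_not.2 (hiff.1 hres))]
    rw [abs_sub_cast (vE 2 n) (vE 2 m), abs_sub_cast (vE 3 n) (vE 3 m),
      abs_sub_cast (vE 5 n) (vE 5 m), hva 2, hvb 2, hva 3, hvb 3, hva 5, hvb 5]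
    omega
  · rw [if_neg hres, if_pos (fun h => hres (hiff.2 h))]

-- ===== VERDICT (by name: the statement is the Claim_ definition above) =====
theorem solve_spec : Claim_equal_solve := by
  intro n m _ hpre
  unfold Spec_solve
  by_cases hnm : n = m
  · subst hnm
    simp [solve, solve_alt]
  rcases hpre with ⟨hn, hm⟩ | rfl
  · exact main_case n m hn hm hnm
  · exact absurd rfl hnm
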